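-- pv_equiv track=rewrite | github.com/YaswanthPalepu/Tech_Demo_Project_POC | src/framework_handlers/flask_handler.py | _guess_app_module
-- ===== SOURCE A (Python) =====
-- from typing import Any, Dict, List
--
-- def _guess_app_module(analysis: Dict[str, Any]) -> str:
--     """
--     Guess the module path exposing `app` or `create_app`.
--     Preference: app.py, wsgi.py, then any module with 'app' in name.
--     """
--     ps = analysis.get("project_structure", {}) or {}
--     module_paths = list(ps.get("module_paths", {}).keys()) if isinstance(ps, dict) else []
--     for pref in ("app.py", "wsgi.py"):
--         for p in module_paths:
--             if p.lower().endswith(pref):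
--                 return p.replace("/", ".").replace("\\", ".").rstrip(".py")
--     for p in module_paths:
--         if "app" in p.lower():
--             return p.replace("/", ".").replace("\\", ".").rstrip(".py")
--     return "app"
-- ===== SOURCE B (Python) =====
-- from typing import Any, Dict, List
--
-- def _guess_app_module(analysis: Dict[str, Any]) -> str:
--     """
--     Guess the module path exposing `app` or `create_app`.
--     Single scoring pass: rank 0 = *app.py, 1 = *wsgi.py, 2 = 'app' in name;
--     keep the lowest-ranked candidate, ties broken by earliest position.
--     """
--     ps = analysis.get("project_structure", {}) or {}
--     module_paths = list(ps.get("module_paths", {}).keys()) if isinstance(ps, dict) else []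
--     best = None  # (rank, path)
--     for p in module_paths:
--         low = p.lower()
--         if low.endswith("app.py"):
--             rank = 0
--         elif low.endswith("wsgi.py"):
--             rank = 1
--         elif "app" in low:
--             rank = 2
--         else:
--             continue
--         if best is None or rank < best[0]:
--             best = (rank, p)
--     if best is None:
--         return "app"
--     return best[1].replace("/", ".").replace("\\", ".").rstrip(".py")
-- ===== Notes on version B (the rewrite author's own statement) =====
-- stated objective: alternative
-- what changed: Replaces A's three priority-ordered scans over module_paths by one scoring pass that assigns each path a rank (0 app.py, 1 wsgi.py, 2 contains 'app') and keeps the lowest-ranked, earliest candidate.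
import Mathlib
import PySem

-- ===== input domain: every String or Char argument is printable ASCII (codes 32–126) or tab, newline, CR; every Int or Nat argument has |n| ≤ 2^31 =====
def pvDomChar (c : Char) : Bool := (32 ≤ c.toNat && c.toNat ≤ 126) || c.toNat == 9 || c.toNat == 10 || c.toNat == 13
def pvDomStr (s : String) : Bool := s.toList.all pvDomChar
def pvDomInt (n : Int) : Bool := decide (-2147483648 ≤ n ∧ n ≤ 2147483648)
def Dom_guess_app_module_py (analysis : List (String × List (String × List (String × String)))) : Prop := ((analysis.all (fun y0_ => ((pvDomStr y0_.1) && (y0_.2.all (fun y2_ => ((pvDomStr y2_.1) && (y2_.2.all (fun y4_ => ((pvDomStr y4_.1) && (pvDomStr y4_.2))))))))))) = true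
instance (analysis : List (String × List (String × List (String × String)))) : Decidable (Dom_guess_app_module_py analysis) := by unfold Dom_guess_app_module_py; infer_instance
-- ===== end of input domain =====

-- ===== PORT A =====
-- B changes only the scan strategy (one scoring pass instead of three priority scans); same value everywhere.
-- A-side/shared helpers: the dict plumbing and the final path transform are the identical lines in both Pythons.

-- p.replace("/", ".").replace("\\", ".").rstrip(".py")  — rstrip(".py") strips trailing chars from the SET {'.','p','y'}
-- (exact hand port: PySem has no rstrip-with-chars primitive)
def pvTransform (p : String) : String :=
  String.ofList ((((PySem.Str.replace (PySem.Str.replace p "/" ".") "\\" ".").toList).reverse.dropWhile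
    (fun c => c == '.' || c == 'p' || c == 'y')).reverse)

-- ps = analysis.get("project_structure", {}) or {};  module_paths = list(ps.get("module_paths", {}).keys())
-- (isinstance(ps, dict) is always true under the type convention; `or {}` maps the empty dict to {}, the identity here)
def pvModulePaths (analysis : List (String × List (String × List (String × String)))) : List String :=
  let ps := (PySem.Dict.mk analysis).getD "project_structure" []
  let ps := if ps.isEmpty then [] else ps
  (PySem.Dict.mk ((PySem.Dict.mk ps).getD "module_paths" [])).keys

-- the three membership tests (named so the lemmas below can speak about them; same code as the Python lambdas)
def pvE0 (p : String) : Bool := PySem.Str.endswith (PySem.Str.lower p) "app.py"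
def pvE1 (p : String) : Bool := PySem.Str.endswith (PySem.Str.lower p) "wsgi.py"
def pvE2 (p : String) : Bool := PySem.Str.isIn "app" (PySem.Str.lower p)

-- the two-element outer loop `for pref in ("app.py", "wsgi.py")` unrolled; each inner loop with early return is a find?
def guess_app_module_py (analysis : List (String × List (String × List (String × String)))) : String :=
  match (pvModulePaths analysis).find? pvE0 with
  | some p => pvTransform p
  | none =>
    match (pvModulePaths analysis).find? pvE1 with
    | some p => pvTransform p
    | none =>
      match (pvModulePaths analysis).find? pvE2 with
      | some p => pvTransform p
      | none => "app"

-- ===== PORT B =====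
-- rank of one path (the if/elif/elif/continue body of B's loop)
def pvRank? (p : String) : Option Nat :=
  let low := PySem.Str.lower p
  if PySem.Str.endswith low "app.py" then some 0
  else if PySem.Str.endswith low "wsgi.py" then some 1
  else if PySem.Str.isIn "app" low then some 2
  else none


-- `if best is None or rank < best[0]: best = (rank, p)`
def pvStep (best : Option (Nat × String)) (p : String) : Option (Nat × String) :=
  match pvRank? p with
  | none => best
  | some r =>
    match best with
    | none => some (r, p)
    | some (br, bp) => if r < br then some (r, p) else some (br, bp)

def guess_app_module_py_alt (analysis : List (String × List (String × List (String × String)))) : String :=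
  match (pvModulePaths analysis).foldl pvStep none with
  | none => "app"
  | some (_, p) => pvTransform p

-- ===== PRECONDITION & SPEC =====
def Spec_guess_app_module_py (analysis : List (String × List (String × List (String × String)))) (out : String) : Prop := out = guess_app_module_py_alt analysis
instance (analysis : List (String × List (String × List (String × String)))) (out : String) : Decidable (Spec_guess_app_module_py analysis out) := by unfold Spec_guess_app_module_py; infer_instance

-- ===== CLAIM (what is proved, stated in full; the proofs are below) =====
def Claim_equal_guess_app_module_py : Prop := ∀ (analysis : List (String × List (String × List (String × String)))), Dom_guess_app_module_py analysis → Spec_guess_app_module_py analysis (guess_app_module_py analysis)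

-- ===== LEMMAS AND PROOFS =====

-- the rank tests, written through the named predicates (definitional)
lemma pvRank?_eq (p : String) :
    pvRank? p = if pvE0 p then some 0 else if pvE1 p then some 1 else if pvE2 p then some 2
                else none := rfl

-- a rank-0 best is absorbing
lemma pv_foldl_best0 (L : List String) (p : String) :
    L.foldl pvStep (some (0, p)) = some (0, p) := by
  induction L with
  | nil => rfl
  | cons x t ih =>
    have hx : pvStep (some (0, p)) x = some (0, p) := by
      simp only [pvStep]; cases pvRank? x <;> simp
    simp [List.foldl_cons, hx, ih]

-- a rank-1 best can only be beaten by a later rank-0 path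
lemma pv_foldl_best1 (L : List String) (p : String) :
    L.foldl pvStep (some (1, p)) =
      match L.find? pvE0 with
      | some q => some (0, q)
      | none => some (1, p) := by
  induction L generalizing p with
  | nil => rfl
  | cons x t ih =>
    by_cases h0 : pvE0 x
    · have hx : pvStep (some (1, p)) x = some (0, x) := by
        simp [pvStep, pvRank?_eq, h0]
      simp [List.foldl_cons, hx, pv_foldl_best0, List.find?_cons_of_pos h0]
    · have hx : pvStep (some (1, p)) x = some (1, p) := by
        by_cases h1 : pvE1 x <;> by_cases h2 : pvE2 x <;>
          simp [pvStep, pvRank?_eq, h0, h1, h2]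
      simp [List.foldl_cons, hx, ih, List.find?_cons_of_neg (by simpa using h0)]

-- a rank-2 best survives unless a rank-0, or failing that a first rank-1, path appears
lemma pv_foldl_best2 (L : List String) (p : String) :
    L.foldl pvStep (some (2, p)) =
      match L.find? pvE0 with
      | some q => some (0, q)
      | none =>
        match L.find? (fun x => !pvE0 x && pvE1 x) with
        | some q => some (1, q)
        | none => some (2, p) := by
  induction L generalizing p with
  | nil => rfl
  | cons x t ih =>
    by_cases h0 : pvE0 x
    · have hx : pvStep (some (2, p)) x = some (0, x) := by
        simp [pvStep, pvRank?_eq, h0]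
      simp [List.foldl_cons, hx, pv_foldl_best0, List.find?_cons_of_pos h0]
    · by_cases h1 : pvE1 x
      · have hx : pvStep (some (2, p)) x = some (1, x) := by
          simp [pvStep, pvRank?_eq, h0, h1]
        rw [List.foldl_cons, hx, pv_foldl_best1,
            List.find?_cons_of_neg (by simpa using h0),
            List.find?_cons_of_pos (by simp [h0, h1])]
      · have hx : pvStep (some (2, p)) x = some (2, p) := by
          by_cases h2 : pvE2 x <;> simp [pvStep, pvRank?_eq, h0, h1, h2]
        rw [List.foldl_cons, hx, ih,
            List.find?_cons_of_neg (by simpa using h0),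
            List.find?_cons_of_neg (by simp [h0, h1])]

-- the whole fold from an empty best, characterised by the three (mutually exclusive) find?s
lemma pv_foldl_none (L : List String) :
    L.foldl pvStep none =
      match L.find? pvE0 with
      | some q => some (0, q)
      | none =>
        match L.find? (fun x => !pvE0 x && pvE1 x) with
        | some q => some (1, q)
        | none =>
          match L.find? (fun x => !pvE0 x && (!pvE1 x && pvE2 x)) with
          | some q => some (2, q)
          | none => none := by
  induction L with
  | nil => rfl
  | cons x t ih =>
    by_cases h0 : pvE0 x
    · have hx : pvStep none x = some (0, x) := by simp [pvStep, pvRank?_eq, h0]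
      simp [List.foldl_cons, hx, pv_foldl_best0, List.find?_cons_of_pos h0]
    · by_cases h1 : pvE1 x
      · have hx : pvStep none x = some (1, x) := by simp [pvStep, pvRank?_eq, h0, h1]
        rw [List.foldl_cons, hx, pv_foldl_best1,
            List.find?_cons_of_neg (by simpa using h0),
            List.find?_cons_of_pos (by simp [h0, h1])]
      · by_cases h2 : pvE2 x
        · have hx : pvStep none x = some (2, x) := by simp [pvStep, pvRank?_eq, h0, h1, h2]
          rw [List.foldl_cons, hx, pv_foldl_best2,
              List.find?_cons_of_neg (by simpa using h0),
              List.find?_cons_of_neg (by simp [h0, h1]),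
              List.find?_cons_of_pos (by simp [h0, h1, h2])]
        · have hx : pvStep none x = none := by simp [pvStep, pvRank?_eq, h0, h1, h2]
          rw [List.foldl_cons, hx, ih,
              List.find?_cons_of_neg (by simpa using h0),
              List.find?_cons_of_neg (by simp [h0, h1]),
              List.find?_cons_of_neg (by simp [h0, h1, h2])]

-- dropping a conjunct that is false on every element of the list
lemma pv_find?_and_not {P Q : String → Bool} (L : List String)
    (h : ∀ x ∈ L, P x = false) :
    L.find? (fun x => !P x && Q x) = L.find? Q := by
  induction L with
  | nil => rfl
  | cons x t ih =>
    have hx : P x = false := h x (by simp)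
    by_cases hq : Q x
    · rw [List.find?_cons_of_pos (by simp [hx, hq]), List.find?_cons_of_pos hq]
    · rw [List.find?_cons_of_neg (by simp [hx, hq]), List.find?_cons_of_neg (by simpa using hq)]
      exact ih (fun y hy => h y (by simp [hy]))


-- ===== VERDICT (by name: the statement is the Claim_ definition above) =====
theorem guess_app_module_py_spec : Claim_equal_guess_app_module_py := by
  intro analysis _
  unfold Spec_guess_app_module_py guess_app_module_py guess_app_module_py_alt
  rw [pv_foldl_none]
  cases h0 : (pvModulePaths analysis).find? pvE0 with
  | some p => simp
  | none =>
    have h0' : ∀ x ∈ pvModulePaths analysis, pvE0 x = false := by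
      intro x hx; simpa using List.find?_eq_none.mp h0 x hx
    rw [pv_find?_and_not _ h0']
    cases h1 : (pvModulePaths analysis).find? pvE1 with
    | some p => simp
    | none =>
      have h1' : ∀ x ∈ pvModulePaths analysis, pvE1 x = false := by
        intro x hx; simpa using List.find?_eq_none.mp h1 x hx
      rw [pv_find?_and_not (Q := fun x => !pvE1 x && pvE2 x) _ h0',
          pv_find?_and_not _ h1']
      cases h2 : (pvModulePaths analysis).find? pvE2 with
      | some p => simp
      | none => simp
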